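-- pv_equiv track=rewrite | github.com/TheTymanIRL/UrbanUN | module2hard.py | choice_the_password
-- ===== SOURCE A (Python) =====
-- def choice_the_password(num):
--     numbers = []
--     for i in range(1, num):
--         for j in range(1, num):
--             sum_ = i + j
--             if int(num) % int(sum_) == 0 and int(i) != int(j):
--                 if str(i) and str(j) not in numbers:
--                     numbers.append(str(i))
--                     numbers.append(str(j))
--     numbers = ''.join(numbers)
--     return numbers
-- ===== SOURCE B (Python) =====
-- def choice_the_password(num):
--     if num <= 1:
--         return ''
--     divs = [d for d in range(2, 2 * num - 1) if num % d == 0]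
--     numbers = []
--     seen = set()
--     for i in range(1, num):
--         for d in divs:
--             j = d - i
--             if 1 <= j <= num - 1 and i != j and str(j) not in seen:
--                 si = str(i)
--                 sj = str(j)
--                 numbers.append(si)
--                 numbers.append(sj)
--                 seen.add(si)
--                 seen.add(sj)
--     return ''.join(numbers)
-- ===== Notes on version B (the rewrite author's own statement) =====
-- stated objective: faster
-- what changed: B precomputes the ascending divisor list of num once and drives the inner loop over it (j = d - i) instead of scanning all j, and replaces the O(len) list-membership dedup test with a 'seen' set, while keeping A's exact stateful dedup semantics and emission order.
import Mathlib
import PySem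

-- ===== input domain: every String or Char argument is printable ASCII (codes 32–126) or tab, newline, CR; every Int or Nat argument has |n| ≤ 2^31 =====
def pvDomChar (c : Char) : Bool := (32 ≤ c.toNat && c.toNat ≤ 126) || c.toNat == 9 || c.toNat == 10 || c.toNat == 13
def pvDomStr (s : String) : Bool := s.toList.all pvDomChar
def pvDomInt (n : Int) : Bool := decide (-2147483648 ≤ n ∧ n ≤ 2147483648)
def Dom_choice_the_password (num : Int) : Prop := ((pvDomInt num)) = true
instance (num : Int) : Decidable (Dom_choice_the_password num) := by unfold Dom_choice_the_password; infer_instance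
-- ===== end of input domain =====

-- B precomputes the divisors of num once and drives the inner loop over them (j = d - i),
-- with a 'seen' set for the dedup test; same output (A's stateful dedup and emission order preserved).


-- ===== PORT A =====
def choice_the_password (num : Int) : String :=
  let numbers : List String :=
    (PySem.List.pyRange 1 num 1).foldl (fun numbers i =>
      (PySem.List.pyRange 1 num 1).foldl (fun numbers j =>
        let sum_ : Int := i + j
        if PySem.Int.mod num sum_ = 0 ∧ i ≠ j then
          if PySem.Int.toStr i ≠ "" ∧ PySem.Int.toStr j ∉ numbers then
            numbers ++ [PySem.Int.toStr i, PySem.Int.toStr j]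
          else numbers
        else numbers) numbers) []
  PySem.Str.join "" numbers

-- ===== PORT B =====
def choice_the_password_alt (num : Int) : String :=
  if num ≤ 1 then "" else
  let divs : List Int :=
    (PySem.List.pyRange 2 (2 * num - 1) 1).filter (fun d => PySem.Int.mod num d == 0)
  let st : List String × PySem.Set String :=
    (PySem.List.pyRange 1 num 1).foldl (fun st i =>
      divs.foldl (fun st d =>
        let j : Int := d - i
        if 1 ≤ j ∧ j ≤ num - 1 ∧ i ≠ j ∧ PySem.Int.toStr j ∉ st.2 then
          let si := PySem.Int.toStr i
          let sj := PySem.Int.toStr j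
          (st.1 ++ [si, sj], PySem.Set.add (PySem.Set.add st.2 si) sj)
        else st) st) ([], PySem.Set.ofList [])
  PySem.Str.join "" st.1

-- ===== PRECONDITION & SPEC =====
def Spec_choice_the_password (num : Int) (out : String) : Prop := out = choice_the_password_alt num
instance (num : Int) (out : String) : Decidable (Spec_choice_the_password num out) := by unfold Spec_choice_the_password; infer_instance

-- ===== CLAIM (what is proved, stated in full; the proofs are below) =====
def Claim_equal_choice_the_password : Prop := ∀ (num : Int), Dom_choice_the_password num → Spec_choice_the_password num (choice_the_password num)

-- ===== LEMMAS AND PROOFS =====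

-- str(n) is never the empty string
theorem pv_toStr_ne_empty (n : Int) : PySem.Int.toStr n ≠ "" := by
  unfold PySem.Int.toStr PySem.Int.toChars
  intro h
  have h2 := congrArg String.toList h
  simp at h2
  split at h2
  · simp at h2
  · have : 0 < (Nat.toDigits 10 n.toNat).length := Nat.length_toDigits_pos
    simp [h2] at this

-- shifting a unit-step range
theorem pv_pyRange_shift (a b i : Int) :
    (PySem.List.pyRange a b 1).map (fun d => d - i) = PySem.List.pyRange (a - i) (b - i) 1 := by
  rw [PySem.List.pyRange_one, PySem.List.pyRange_one, List.map_map]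
  have h : (b - i - (a - i)).toNat = (b - a).toNat := by omega
  rw [h]
  apply List.map_congr_left
  intro k _
  simp
  omega

-- mapping a shift through a filter
theorem pv_map_sub_filter (l : List Int) (p : Int → Bool) (i : Int) :
    (l.filter p).map (fun d => d - i) =
      (l.map (fun d => d - i)).filter (fun j => p (j + i)) := by
  induction l with
  | nil => simp
  | cons a l ih =>
    by_cases h : p a = true
    · simp [h, sub_add_cancel, ih]
    · simp only [Bool.not_eq_true] at h
      simp [h, sub_add_cancel, ih]

-- the j-list A's inner loop processes equals the shifted, bound-filtered divisor list B walks
theorem pv_jlist_eq (num i : Int) (hi : 1 ≤ i) (hin : i < num) :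
    List.filter (fun x => decide (PySem.Int.mod num (i + x) = 0 ∧ i ≠ x)) (PySem.List.pyRange 1 num 1)
      = (List.filter (fun x => decide (1 ≤ x - i ∧ x - i ≤ num - 1 ∧ i ≠ x - i))
          (List.filter (fun d => PySem.Int.mod num d == 0) (PySem.List.pyRange 2 (2 * num - 1) 1))).map
            (fun d => d - i) := by
  rw [List.filter_filter, pv_map_sub_filter, pv_pyRange_shift]
  rw [PySem.List.pyRange_one_append (2 - i) 1 (2 * num - 1 - i) (by omega) (by omega),
    PySem.List.pyRange_one_append 1 num (2 * num - 1 - i) (by omega) (by omega),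
    List.filter_append, List.filter_append]
  rw [(List.filter_eq_nil_iff (l := PySem.List.pyRange (2 - i) 1 1)).mpr (by
    intro j hj
    rw [PySem.List.mem_pyRange_one] at hj
    simp only [Bool.and_eq_true, decide_eq_true_eq, not_and]
    intro h
    omega)]
  rw [(List.filter_eq_nil_iff (l := PySem.List.pyRange num (2 * num - 1 - i) 1)).mpr (by
    intro j hj
    rw [PySem.List.mem_pyRange_one] at hj
    simp only [Bool.and_eq_true, decide_eq_true_eq, not_and]
    intro h
    omega)]
  rw [List.nil_append, List.append_nil]
  apply List.filter_congr
  intro j hj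
  rw [PySem.List.mem_pyRange_one] at hj
  by_cases h1 : PySem.Int.mod num (i + j) = 0 <;>
    by_cases h2 : i = j <;>
      simp [h1, h2, add_comm j i]
  all_goals omega

-- the pair-state loop (list + seen set) computes the same list as the plain-list loop,
-- and keeps 'seen' holding exactly the strings in the list
theorem pv_fold_pair (ti : String) (l : List Int) :
    ∀ (acc : List String) (seen : PySem.Set String), (∀ s, s ∈ seen ↔ s ∈ acc) →
      (l.foldl (fun st j =>
          if PySem.Int.toStr j ∉ st.2 then
            (st.1 ++ [ti, PySem.Int.toStr j],
              PySem.Set.add (PySem.Set.add st.2 ti) (PySem.Int.toStr j))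
          else st) (acc, seen)).1
        = l.foldl (fun numbers j =>
            if PySem.Int.toStr j ∉ numbers then numbers ++ [ti, PySem.Int.toStr j]
            else numbers) acc
      ∧ (∀ s, s ∈ (l.foldl (fun st j =>
          if PySem.Int.toStr j ∉ st.2 then
            (st.1 ++ [ti, PySem.Int.toStr j],
              PySem.Set.add (PySem.Set.add st.2 ti) (PySem.Int.toStr j))
          else st) (acc, seen)).2
            ↔ s ∈ (l.foldl (fun st j =>
          if PySem.Int.toStr j ∉ st.2 then
            (st.1 ++ [ti, PySem.Int.toStr j],
              PySem.Set.add (PySem.Set.add st.2 ti) (PySem.Int.toStr j))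
          else st) (acc, seen)).1) := by
  induction l with
  | nil => intro acc seen hmem; exact ⟨rfl, hmem⟩
  | cons j l ih =>
    intro acc seen hmem
    by_cases hj : PySem.Int.toStr j ∈ seen
    · have hj' : PySem.Int.toStr j ∈ acc := (hmem _).1 hj
      simpa [List.foldl_cons, hj, hj'] using ih acc seen hmem
    · have hj' : PySem.Int.toStr j ∉ acc := fun h => hj ((hmem _).2 h)
      have hmem' : ∀ s, s ∈ PySem.Set.add (PySem.Set.add seen ti) (PySem.Int.toStr j)
          ↔ s ∈ acc ++ [ti, PySem.Int.toStr j] := by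
        intro s
        rw [PySem.Set.mem_add, PySem.Set.mem_add]
        simp [hmem s]
        tauto
      simpa [List.foldl_cons, hj, hj'] using
        ih (acc ++ [ti, PySem.Int.toStr j])
          (PySem.Set.add (PySem.Set.add seen ti) (PySem.Int.toStr j)) hmem'

-- for each admitted i, A's inner loop on the list equals B's inner loop on (list, seen)
theorem pv_inner_eq (num i : Int) (hi : 1 ≤ i) (hin : i < num)
    (acc : List String) (seen : PySem.Set String) (hmem : ∀ s, s ∈ seen ↔ s ∈ acc) :
    (((List.filter (fun d => PySem.Int.mod num d == 0)
        (PySem.List.pyRange 2 (2 * num - 1) 1)).foldl (fun st d =>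
          if 1 ≤ d - i ∧ d - i ≤ num - 1 ∧ i ≠ d - i ∧ PySem.Int.toStr (d - i) ∉ st.2 then
            (st.1 ++ [PySem.Int.toStr i, PySem.Int.toStr (d - i)],
              PySem.Set.add (PySem.Set.add st.2 (PySem.Int.toStr i)) (PySem.Int.toStr (d - i)))
          else st) (acc, seen)).1
      = (PySem.List.pyRange 1 num 1).foldl (fun numbers j =>
          if PySem.Int.mod num (i + j) = 0 ∧ i ≠ j then
            if PySem.Int.toStr i ≠ "" ∧ PySem.Int.toStr j ∉ numbers then
              numbers ++ [PySem.Int.toStr i, PySem.Int.toStr j]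
            else numbers
          else numbers) acc)
    ∧ (∀ s, s ∈ ((List.filter (fun d => PySem.Int.mod num d == 0)
        (PySem.List.pyRange 2 (2 * num - 1) 1)).foldl (fun st d =>
          if 1 ≤ d - i ∧ d - i ≤ num - 1 ∧ i ≠ d - i ∧ PySem.Int.toStr (d - i) ∉ st.2 then
            (st.1 ++ [PySem.Int.toStr i, PySem.Int.toStr (d - i)],
              PySem.Set.add (PySem.Set.add st.2 (PySem.Int.toStr i)) (PySem.Int.toStr (d - i)))
          else st) (acc, seen)).2
        ↔ s ∈ ((List.filter (fun d => PySem.Int.mod num d == 0)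
        (PySem.List.pyRange 2 (2 * num - 1) 1)).foldl (fun st d =>
          if 1 ≤ d - i ∧ d - i ≤ num - 1 ∧ i ≠ d - i ∧ PySem.Int.toStr (d - i) ∉ st.2 then
            (st.1 ++ [PySem.Int.toStr i, PySem.Int.toStr (d - i)],
              PySem.Set.add (PySem.Set.add st.2 (PySem.Int.toStr i)) (PySem.Int.toStr (d - i)))
          else st) (acc, seen)).1) := by
  -- normalise A's inner body: drop the always-true 'str(i)' truthiness test,
  -- then turn the static test into a filter
  have hA : (PySem.List.pyRange 1 num 1).foldl (fun numbers j =>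
        if PySem.Int.mod num (i + j) = 0 ∧ i ≠ j then
          if PySem.Int.toStr i ≠ "" ∧ PySem.Int.toStr j ∉ numbers then
            numbers ++ [PySem.Int.toStr i, PySem.Int.toStr j]
          else numbers
        else numbers) acc
      = (List.filter (fun x => decide (PySem.Int.mod num (i + x) = 0 ∧ i ≠ x))
          (PySem.List.pyRange 1 num 1)).foldl (fun numbers j =>
            if PySem.Int.toStr j ∉ numbers then numbers ++ [PySem.Int.toStr i, PySem.Int.toStr j]
            else numbers) acc := by
    rw [show (fun (numbers : List String) (j : Int) =>
        if PySem.Int.mod num (i + j) = 0 ∧ i ≠ j then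
          if PySem.Int.toStr i ≠ "" ∧ PySem.Int.toStr j ∉ numbers then
            numbers ++ [PySem.Int.toStr i, PySem.Int.toStr j]
          else numbers
        else numbers)
      = (fun numbers j =>
        if PySem.Int.mod num (i + j) = 0 ∧ i ≠ j then
          (if PySem.Int.toStr j ∉ numbers then
            numbers ++ [PySem.Int.toStr i, PySem.Int.toStr j] else numbers)
        else numbers) from by
        funext numbers j
        simp [pv_toStr_ne_empty i]]
    exact PySem.List.foldl_ite_eq_foldl_filter
      (fun x => PySem.Int.mod num (i + x) = 0 ∧ i ≠ x)
      (fun numbers j =>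
        if PySem.Int.toStr j ∉ numbers then numbers ++ [PySem.Int.toStr i, PySem.Int.toStr j]
        else numbers) _ _
  -- normalise B's inner body the same way
  have hB : ∀ st : List String × PySem.Set String,
      (List.filter (fun d => PySem.Int.mod num d == 0)
        (PySem.List.pyRange 2 (2 * num - 1) 1)).foldl (fun st d =>
          if 1 ≤ d - i ∧ d - i ≤ num - 1 ∧ i ≠ d - i ∧ PySem.Int.toStr (d - i) ∉ st.2 then
            (st.1 ++ [PySem.Int.toStr i, PySem.Int.toStr (d - i)],
              PySem.Set.add (PySem.Set.add st.2 (PySem.Int.toStr i)) (PySem.Int.toStr (d - i)))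
          else st) st
      = ((List.filter (fun x => decide (1 ≤ x - i ∧ x - i ≤ num - 1 ∧ i ≠ x - i))
            (List.filter (fun d => PySem.Int.mod num d == 0)
              (PySem.List.pyRange 2 (2 * num - 1) 1))).map (fun d => d - i)).foldl
          (fun st j =>
            if PySem.Int.toStr j ∉ st.2 then
              (st.1 ++ [PySem.Int.toStr i, PySem.Int.toStr j],
                PySem.Set.add (PySem.Set.add st.2 (PySem.Int.toStr i)) (PySem.Int.toStr j))
            else st) st := by
    intro st
    rw [show (fun (st : List String × PySem.Set String) (d : Int) =>
        if 1 ≤ d - i ∧ d - i ≤ num - 1 ∧ i ≠ d - i ∧ PySem.Int.toStr (d - i) ∉ st.2 then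
          (st.1 ++ [PySem.Int.toStr i, PySem.Int.toStr (d - i)],
            PySem.Set.add (PySem.Set.add st.2 (PySem.Int.toStr i)) (PySem.Int.toStr (d - i)))
        else st)
      = (fun st d =>
        if 1 ≤ d - i ∧ d - i ≤ num - 1 ∧ i ≠ d - i then
          (if PySem.Int.toStr (d - i) ∉ st.2 then
            (st.1 ++ [PySem.Int.toStr i, PySem.Int.toStr (d - i)],
              PySem.Set.add (PySem.Set.add st.2 (PySem.Int.toStr i)) (PySem.Int.toStr (d - i)))
          else st)
        else st) from by
        funext st d
        split_ifs <;> tauto]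
    rw [PySem.List.foldl_ite_eq_foldl_filter
      (fun x => 1 ≤ x - i ∧ x - i ≤ num - 1 ∧ i ≠ x - i)
      (fun (st : List String × PySem.Set String) (j : Int) =>
        if PySem.Int.toStr (j - i) ∉ st.2 then
          (st.1 ++ [PySem.Int.toStr i, PySem.Int.toStr (j - i)],
            PySem.Set.add (PySem.Set.add st.2 (PySem.Int.toStr i)) (PySem.Int.toStr (j - i)))
        else st)]
    exact (List.foldl_map (f := fun d : Int => d - i)
      (g := fun (st : List String × PySem.Set String) (j : Int) =>
        if PySem.Int.toStr j ∉ st.2 then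
          (st.1 ++ [PySem.Int.toStr i, PySem.Int.toStr j],
            PySem.Set.add (PySem.Set.add st.2 (PySem.Int.toStr i)) (PySem.Int.toStr j))
        else st)).symm
  rw [hA, hB, pv_jlist_eq num i hi hin]
  exact pv_fold_pair (PySem.Int.toStr i)
    ((List.filter (fun x => decide (1 ≤ x - i ∧ x - i ≤ num - 1 ∧ i ≠ x - i))
      (List.filter (fun d => PySem.Int.mod num d == 0)
        (PySem.List.pyRange 2 (2 * num - 1) 1))).map (fun d => d - i))
    acc seen hmem

-- the outer loops agree, propagating the seen-set invariant
theorem pv_outer_eq (num : Int) (l : List Int) (hl : ∀ i ∈ l, 1 ≤ i ∧ i < num) :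
    ∀ (acc : List String) (seen : PySem.Set String), (∀ s, s ∈ seen ↔ s ∈ acc) →
      ((l.foldl (fun st i =>
          (List.filter (fun d => PySem.Int.mod num d == 0)
            (PySem.List.pyRange 2 (2 * num - 1) 1)).foldl (fun st d =>
              if 1 ≤ d - i ∧ d - i ≤ num - 1 ∧ i ≠ d - i ∧ PySem.Int.toStr (d - i) ∉ st.2 then
                (st.1 ++ [PySem.Int.toStr i, PySem.Int.toStr (d - i)],
                  PySem.Set.add (PySem.Set.add st.2 (PySem.Int.toStr i)) (PySem.Int.toStr (d - i)))
              else st) st) (acc, seen)).1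
        = l.foldl (fun numbers i =>
            (PySem.List.pyRange 1 num 1).foldl (fun numbers j =>
              if PySem.Int.mod num (i + j) = 0 ∧ i ≠ j then
                if PySem.Int.toStr i ≠ "" ∧ PySem.Int.toStr j ∉ numbers then
                  numbers ++ [PySem.Int.toStr i, PySem.Int.toStr j]
                else numbers
              else numbers) numbers) acc) := by
  induction l with
  | nil => intro acc seen _; rfl
  | cons i l ih =>
    intro acc seen hmem
    have hi := hl i (List.mem_cons_self ..)
    obtain ⟨h1, h2⟩ := pv_inner_eq num i hi.1 hi.2 acc seen hmem
    rw [List.foldl_cons, List.foldl_cons]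
    rw [show ((List.filter (fun d => PySem.Int.mod num d == 0)
        (PySem.List.pyRange 2 (2 * num - 1) 1)).foldl (fun st d =>
          if 1 ≤ d - i ∧ d - i ≤ num - 1 ∧ i ≠ d - i ∧ PySem.Int.toStr (d - i) ∉ st.2 then
            (st.1 ++ [PySem.Int.toStr i, PySem.Int.toStr (d - i)],
              PySem.Set.add (PySem.Set.add st.2 (PySem.Int.toStr i)) (PySem.Int.toStr (d - i)))
          else st) (acc, seen))
      = (((List.filter (fun d => PySem.Int.mod num d == 0)
        (PySem.List.pyRange 2 (2 * num - 1) 1)).foldl (fun st d =>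
          if 1 ≤ d - i ∧ d - i ≤ num - 1 ∧ i ≠ d - i ∧ PySem.Int.toStr (d - i) ∉ st.2 then
            (st.1 ++ [PySem.Int.toStr i, PySem.Int.toStr (d - i)],
              PySem.Set.add (PySem.Set.add st.2 (PySem.Int.toStr i)) (PySem.Int.toStr (d - i)))
          else st) (acc, seen)).1,
        ((List.filter (fun d => PySem.Int.mod num d == 0)
        (PySem.List.pyRange 2 (2 * num - 1) 1)).foldl (fun st d =>
          if 1 ≤ d - i ∧ d - i ≤ num - 1 ∧ i ≠ d - i ∧ PySem.Int.toStr (d - i) ∉ st.2 then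
            (st.1 ++ [PySem.Int.toStr i, PySem.Int.toStr (d - i)],
              PySem.Set.add (PySem.Set.add st.2 (PySem.Int.toStr i)) (PySem.Int.toStr (d - i)))
          else st) (acc, seen)).2) from rfl]
    rw [h1]
    exact ih (fun x hx => hl x (List.mem_cons_of_mem _ hx)) _ _ (h1 ▸ h2)

-- ===== VERDICT (by name: the statement is the Claim_ definition above) =====
theorem choice_the_password_spec : Claim_equal_choice_the_password := by
  intro num _
  unfold Spec_choice_the_password choice_the_password choice_the_password_alt
  by_cases h : num ≤ 1
  · simp [h, PySem.List.pyRange_one_eq_nil h, PySem.Str.join]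
  · simp only [h, if_false]
    refine congrArg (PySem.Str.join "") ?_
    exact (pv_outer_eq num (PySem.List.pyRange 1 num 1)
      (fun i hi => by rw [PySem.List.mem_pyRange_one] at hi; exact hi)
      [] (PySem.Set.ofList []) (by simp)).symm
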